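-- pv_equiv track=rewrite | github.com/yingl/LintCodeInPython | substring-in-dict.py | wordSubsequence
-- ===== SOURCE A (Python) =====
-- def wordSubsequence(s, wordDict):
--     # write your code here
--     # 记录每个字母在哪些位置出现过，
--     # 如果位置能构造递增序列则满足。
--     ret = []
--     di = {}
--     for i in range(len(s)):
--         if s[i] in di:
--             di[s[i]].append(i)
--         else:
--             di[s[i]] = [i]
--     for word in wordDict:
--         min_pos = -1
--         match = True
--         for c in word:
--             if c not in di:
--                 match = False
--                 break
--             i = 0
--             while i < len(di[c]):
--                 if di[c][i] > min_pos:
--                     min_pos = di[c][i]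
--                     break
--                 else:
--                     i += 1
--             if i == len(di[c]): # 没有找到一个位置符合递增条件
--                 match = False
--                 break
--         if match:
--             ret.append(word)
--     return ret
-- ===== SOURCE B (Python) =====
-- def wordSubsequence(s, wordDict):
--     # Idiomatic two-pointer check: stream through s once per word with an
--     # iterator; no position index is built at all.
--     def is_subseq(word):
--         it = iter(s)
--         return all(c in it for c in word)
--     return [w for w in wordDict if is_subseq(w)]
-- ===== Notes on version B (the rewrite author's own statement) =====
-- stated objective: idiomatic
-- what changed: B drops A's char-to-position-list dictionary and its per-character list scans entirely and instead checks each word with a single streaming two-pointer subsequence scan over s (iterator consumption), collecting matches with a comprehension.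
import Mathlib
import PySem

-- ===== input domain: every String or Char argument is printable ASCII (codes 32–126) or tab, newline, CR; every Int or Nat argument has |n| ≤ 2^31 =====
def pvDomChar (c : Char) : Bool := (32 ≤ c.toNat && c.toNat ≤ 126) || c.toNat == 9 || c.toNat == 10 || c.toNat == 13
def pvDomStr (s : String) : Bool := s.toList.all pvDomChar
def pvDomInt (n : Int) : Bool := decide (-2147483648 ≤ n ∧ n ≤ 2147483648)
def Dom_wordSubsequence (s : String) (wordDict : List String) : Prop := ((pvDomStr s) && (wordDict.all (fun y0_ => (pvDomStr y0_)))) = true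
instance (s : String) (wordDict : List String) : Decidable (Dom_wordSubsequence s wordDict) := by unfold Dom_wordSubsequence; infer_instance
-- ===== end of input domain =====

-- B replaces A's char→position-list dictionary with a direct two-pointer
-- subsequence scan over s for each word (objective: simpler / idiomatic).

-- ===== PORT A =====

-- 'for i in range(len(s)): if s[i] in di: di[s[i]].append(i) else: di[s[i]] = [i]'
-- (index i is always in range, so the loop is transcribed over s with its indices)
def buildDi (t : List Char) : PySem.Dict Char (List Int) :=
  t.zipIdx.foldl
    (fun di p =>
      match di.get? p.1 with
      | some l => di.insert p.1 (l ++ [(p.2 : Int)])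
      | none => di.insert p.1 [(p.2 : Int)])
    PySem.Dict.empty

-- the 'while i < len(di[c])' scan: first element of the list greater than min_pos
-- (returns the new min_pos; none ⟺ the loop ends with i == len(di[c]))
def scanPos (l : List Int) (minPos : Int) : Option Int :=
  match l with
  | [] => none
  | x :: xs => if minPos < x then some x else scanPos xs minPos

-- the 'for c in word' loop with its two 'match = False; break' exits
def checkWord (di : PySem.Dict Char (List Int)) (w : List Char) (minPos : Int) : Bool :=
  match w with
  | [] => true
  | c :: cs =>
    match di.get? c with
    | none => false
    | some l =>
      match scanPos l minPos with
      | none => false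
      | some p => checkWord di cs p

def wordSubsequence (s : String) (wordDict : List String) : List String :=
  let di := buildDi s.toList
  wordDict.foldl (fun ret word => if checkWord di word.toList (-1) then ret ++ [word] else ret) []

-- ===== PORT B =====

-- 'it = iter(s); all(c in it for c in word)': consume s until each char is found
def isSub (w t : List Char) : Bool :=
  match w, t with
  | [], _ => true
  | _ :: _, [] => false
  | c :: ws, d :: ts => if c == d then isSub ws ts else isSub (c :: ws) ts

def wordSubsequence_alt (s : String) (wordDict : List String) : List String :=
  wordDict.filter (fun w => isSub w.toList s.toList)

-- ===== PRECONDITION & SPEC =====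
def Spec_wordSubsequence (s : String) (wordDict : List String) (out : List String) : Prop := out = wordSubsequence_alt s wordDict
instance (s : String) (wordDict : List String) (out : List String) : Decidable (Spec_wordSubsequence s wordDict out) := by unfold Spec_wordSubsequence; infer_instance

-- ===== CLAIM (what is proved, stated in full; the proofs are below) =====
def Claim_equal_wordSubsequence : Prop := ∀ (s : String) (wordDict : List String), Dom_wordSubsequence s wordDict → Spec_wordSubsequence s wordDict (wordSubsequence s wordDict)

-- ===== LEMMAS AND PROOFS =====

-- positions (as Int) at which c occurs in t, when t's first element has index m
def poss (t : List Char) (m : Nat) (c : Char) : List Int :=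
  ((t.zipIdx m).filter (fun p => p.1 == c)).map (fun p => ((p.2 : Nat) : Int))

lemma buildDi_eq_modifyFold (t : List Char) :
    buildDi t =
      (t.zipIdx.map (fun p => (p.1, (p.2 : Int)))).foldl
        (fun d p => d.modify p.1 [] (· ++ [p.2])) PySem.Dict.empty := by
  unfold buildDi
  rw [List.foldl_map]
  congr 1
  funext di p
  cases h : di.get? p.1 with
  | none => simp [PySem.Dict.modify, PySem.Dict.getD_of_get?_eq_none di _ h]
  | some l => simp [PySem.Dict.modify, PySem.Dict.getD_of_get?_eq_some di _ h]

lemma getD_buildDi (t : List Char) (c : Char) :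
    (buildDi t).getD c [] = poss t 0 c := by
  rw [buildDi_eq_modifyFold, PySem.Dict.getD_foldl_modify_append]
  simp [poss, List.filter_map, List.map_map, Function.comp_def, PySem.Dict.getD_empty]

lemma contains_buildDi (t : List Char) (c : Char) :
    (buildDi t).contains c = decide (c ∈ t) := by
  rw [buildDi_eq_modifyFold, PySem.Dict.contains_eq_decide_mem_keys,
    PySem.Dict.keys_foldl_modify_key]
  have h : (t.zipIdx.map (fun p => (p.1, (p.2 : Int)))).map (fun p => p.1) = t := by
    rw [List.map_map]
    simp [Function.comp_def]
  simp only [PySem.Dict.keys_empty, h]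
  simp [PySem.Set.mem_update]

lemma get?_buildDi (t : List Char) (c : Char) :
    (buildDi t).get? c = if c ∈ t then some (poss t 0 c) else none := by
  by_cases hc : c ∈ t
  · have h1 : (buildDi t).contains c = true := by
      rw [contains_buildDi]
      exact decide_eq_true hc
    rw [PySem.Dict.contains_eq_isSome_get?] at h1
    obtain ⟨v, hv⟩ := Option.isSome_iff_exists.mp h1
    have h2 := PySem.Dict.getD_of_get?_eq_some (buildDi t) ([] : List Int) hv
    rw [getD_buildDi] at h2
    rw [hv, if_pos hc, h2]
  · have h1 : (buildDi t).contains c = false := by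
      rw [contains_buildDi]
      exact decide_eq_false hc
    rw [PySem.Dict.contains_eq_isSome_get?] at h1
    rw [if_neg hc]
    exact Option.not_isSome_iff_eq_none.mp (by simp [h1])

lemma poss_cons (a : Char) (t : List Char) (m : Nat) (c : Char) :
    poss (a :: t) m c =
      if a == c then ((m : Nat) : Int) :: poss t (m + 1) c else poss t (m + 1) c := by
  simp only [poss, List.zipIdx_cons, List.filter_cons]
  split <;> simp

lemma poss_lower (t : List Char) (m : Nat) (c : Char) :
    ∀ x ∈ poss t m c, (m : Int) ≤ x := by
  induction t generalizing m with
  | nil => simp [poss]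
  | cons a t ih =>
    intro x hx
    rw [poss_cons] at hx
    split at hx
    · rcases List.mem_cons.mp hx with h | h
      · omega
      · have := ih (m + 1) x h; push_cast at this ⊢; omega
    · have := ih (m + 1) x hx; push_cast at this ⊢; omega

lemma find?_all_true {l : List Int} {p : Int → Bool} (h : ∀ x ∈ l, p x = true) :
    l.find? p = l.head? := by
  cases l with
  | nil => rfl
  | cons x xs => simp [h x (List.mem_cons_self)]

lemma scanPos_eq_find? (l : List Int) (mp : Int) :
    scanPos l mp = l.find? (fun x => decide (mp < x)) := by
  induction l with
  | nil => rfl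
  | cons x xs ih =>
    simp only [scanPos, List.find?_cons]
    by_cases h : mp < x
    · simp [h]
    · simp [h, ih]

-- the dictionary scan finds exactly the first occurrence of c at index ≥ m + k
lemma find?_poss (c : Char) (t : List Char) (m k : Nat) :
    (poss t m c).find? (fun x => decide (((m + k : Nat) : Int) - 1 < x)) =
      ((t.drop k).findIdx? (fun d => d == c)).map (fun j => ((m + k + j : Nat) : Int)) := by
  induction t generalizing m k with
  | nil => simp [poss]
  | cons a t ih =>
    rw [poss_cons]
    by_cases hac : (a == c) = true
    · rw [if_pos hac]
      cases k with
      | zero =>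
        simp [List.findIdx?_cons, hac]
      | succ k' =>
        have h3 := ih (m + 1) k'
        have he : m + 1 + k' = m + (k' + 1) := by omega
        rw [he] at h3
        rw [List.find?_cons_of_neg (by simp only [decide_eq_true_eq]; push_cast; omega),
          h3, List.drop_succ_cons]
    · rw [if_neg hac]
      cases k with
      | zero =>
        have hall : ∀ x ∈ poss t (m + 1) c,
            (decide (((m + 0 : Nat) : Int) - 1 < x)) = true := by
          intro x hx
          have := poss_lower t (m + 1) c x hx
          simp only [decide_eq_true_eq]
          push_cast at this ⊢
          omega
        have hall2 : ∀ x ∈ poss t (m + 1) c,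
            (decide (((m + 1 + 0 : Nat) : Int) - 1 < x)) = true := by
          intro x hx
          have := poss_lower t (m + 1) c x hx
          simp only [decide_eq_true_eq]
          push_cast at this ⊢
          omega
        have h3 := ih (m + 1) 0
        rw [find?_all_true hall2] at h3
        simp only [List.drop_zero] at h3
        rw [find?_all_true hall, h3]
        have hb : (a == c) = false := by simpa using hac
        simp only [List.drop_zero]
        cases hf : t.findIdx? (fun d => d == c) with
        | none => simp [List.findIdx?_cons, hb, hf]
        | some j =>
          simp [List.findIdx?_cons, hb, hf]
          omega
      | succ k' =>
        have h3 := ih (m + 1) k'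
        have he : m + 1 + k' = m + (k' + 1) := by omega
        rw [he] at h3
        rw [h3]
        simp [List.drop_succ_cons]

lemma isSub_cons_eq (c : Char) (ws t : List Char) :
    isSub (c :: ws) t =
      match t.findIdx? (fun d => d == c) with
      | none => false
      | some j => isSub ws (t.drop (j + 1)) := by
  induction t with
  | nil => simp [isSub]
  | cons d ts ih =>
    by_cases h : c = d
    · subst h
      simp [isSub, List.findIdx?_cons]
    · have h1 : (c == d) = false := by simpa using h
      have h2 : (d == c) = false := by simpa using Ne.symm h
      simp only [isSub, h1, List.findIdx?_cons, h2]
      rw [ih]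
      cases hf : ts.findIdx? (fun d => d == c) with
      | none => simp
      | some j => simp [List.drop_succ_cons]

lemma checkWord_eq_isSub (t : List Char) (w : List Char) (k : Nat) :
    checkWord (buildDi t) w ((k : Int) - 1) = isSub w (t.drop k) := by
  induction w generalizing k with
  | nil => simp [checkWord, isSub]
  | cons c ws ih =>
    rw [isSub_cons_eq]
    simp only [checkWord]
    rw [get?_buildDi]
    by_cases hc : c ∈ t
    · rw [if_pos hc]
      split
      · rename_i heq
        exact absurd heq (by simp)
      · rename_i l heq
        have hl : l = poss t 0 c := by
          injection heq with h
          exact h.symm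
        subst hl
        rw [scanPos_eq_find?]
        have hf := find?_poss c t 0 k
        rw [Nat.zero_add] at hf
        rw [hf]
        cases hidx : (t.drop k).findIdx? (fun d => d == c) with
        | none => simp
        | some j =>
          have hd : t.drop (k + j + 1) = (t.drop k).drop (j + 1) := by
            rw [List.drop_drop]
            congr 1
          have h5 := ih (k + j + 1)
          rw [hd] at h5
          have h6 : ((k + j + 1 : Nat) : Int) - 1 = (k : Int) + (j : Int) := by
            push_cast
            ring
          rw [h6] at h5
          simpa using h5
    · rw [if_neg hc]
      have hnone : (t.drop k).findIdx? (fun d => d == c) = none := by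
        rw [List.findIdx?_eq_none_iff]
        intro x hx
        have hxt : x ∈ t := List.mem_of_mem_drop hx
        by_contra hxc
        have : x = c := by simpa using hxc
        exact hc (this ▸ hxt)
      simp [hnone]

-- ===== VERDICT (by name: the statement is the Claim_ definition above) =====
theorem wordSubsequence_spec : Claim_equal_wordSubsequence := by
  intro s wordDict _
  unfold Spec_wordSubsequence wordSubsequence wordSubsequence_alt
  rw [PySem.List.foldl_append_if_eq_filter]
  rw [List.nil_append]
  apply List.filter_congr
  intro w _
  have h := checkWord_eq_isSub s.toList w.toList 0
  simpa using h
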